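-- pv_equiv track=rewrite | github.com/Yu-Miri/Programmas | 프로그래머스/lv1/17681. ［1차］ 비밀지도/［1차］ 비밀지도.py | solution
-- ===== SOURCE A (Python) =====
-- def solution(n, arr1, arr2):
--     answer = []
--     secret_map = []
--     for i, j in zip(arr1, arr2):
--         answer.append(int(bin(i)[2:])+int(bin(j)[2:]))
--     for num in answer:
--         a = ''
--         for i in str(num).zfill(n): #zfill(n)은 왼쪽부터 n자리 수만큼 0으로 채워서 숫자를 반환
--             if i == '0':
--                 a += ' '
--             else:
--                 a += '#'
--         secret_map.append(''.join(a))
--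
--     return secret_map
-- ===== SOURCE B (Python) =====
-- def solution(n, arr1, arr2):
--     tbl = str.maketrans('01', ' #')
--     return [format(a | b, 'b').zfill(n).translate(tbl) for a, b in zip(arr1, arr2)]
-- ===== Notes on version B (the rewrite author's own statement) =====
-- stated objective: idiomatic
-- what changed: B replaces A's detour of reading each bin() string as a decimal number, adding the two decimal numbers, zfilling str() of the sum and looping char-by-char, with a direct bitwise OR per pair formatted in binary, zfilled and translated via str.maketrans in a single comprehension.
-- outside the precondition, e.g. on solution(5, [-1, 2], [0, 2]): A raises ValueError, B returns ['-   #', '   # ']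
import Mathlib
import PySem

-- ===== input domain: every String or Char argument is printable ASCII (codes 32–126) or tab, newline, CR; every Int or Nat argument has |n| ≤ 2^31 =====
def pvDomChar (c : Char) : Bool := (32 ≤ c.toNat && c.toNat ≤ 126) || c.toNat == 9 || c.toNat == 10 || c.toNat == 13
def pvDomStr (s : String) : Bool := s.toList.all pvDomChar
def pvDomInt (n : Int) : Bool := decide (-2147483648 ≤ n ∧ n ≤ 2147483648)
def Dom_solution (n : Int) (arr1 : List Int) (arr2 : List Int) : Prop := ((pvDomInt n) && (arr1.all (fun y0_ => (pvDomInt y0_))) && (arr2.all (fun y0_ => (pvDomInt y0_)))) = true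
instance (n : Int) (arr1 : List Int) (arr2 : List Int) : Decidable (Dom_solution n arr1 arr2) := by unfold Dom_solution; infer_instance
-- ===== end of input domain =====

-- ===== PORT A =====
-- B ORs the rows and formats in binary directly, replacing A's decimal-addition-of-binary-strings detour and per-char loop (idiomatic).
-- Note: int(bin(i)[2:]) raises ValueError for i < 0 (the '[2:]' keeps the 'b' of '-0b…'); such inputs are outside Pre_solution.

-- bin(m)[2:] for m ≥ 0: most-significant-first binary digit characters (exact on Nat)
def pyBinGo (m : Nat) : List Char :=
  if h : m = 0 then [] else pyBinGo (m / 2) ++ [Char.ofNat (48 + m % 2)]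
decreasing_by exact Nat.div_lt_self (Nat.pos_of_ne_zero h) (by norm_num)

def pyBin (m : Nat) : List Char := if m = 0 then ['0'] else pyBinGo m

-- int(s) for a string of decimal digit characters (exact there; A only applies it to such strings under Pre_)
def pyIntDigits (s : List Char) : Nat := s.foldl (fun acc c => 10 * acc + (c.toNat - 48)) 0

-- str(m) for m ≥ 0: decimal digit characters, most significant first
def pyDecGo (m : Nat) : List Char :=
  if h : m = 0 then [] else pyDecGo (m / 10) ++ [Char.ofNat (48 + m % 10)]
decreasing_by exact Nat.div_lt_self (Nat.pos_of_ne_zero h) (by norm_num)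

def pyStrNat (m : Nat) : List Char := if m = 0 then ['0'] else pyDecGo m

-- s.zfill(n) (exact for unsigned digit strings, which is all A applies it to)
def pyZfill (n : Int) (s : List Char) : List Char :=
  if (s.length : Int) < n then List.replicate (n - (s.length : Int)).toNat '0' ++ s else s

def solution (n : Int) (arr1 : List Int) (arr2 : List Int) : List String :=
  -- first loop: answer.append(int(bin(i)[2:]) + int(bin(j)[2:]))  (.toNat models bin on the i ≥ 0 domain admitted by Pre_)
  let answer := (arr1.zip arr2).map (fun p => pyIntDigits (pyBin p.1.toNat) + pyIntDigits (pyBin p.2.toNat))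
  -- second loop: build each row char by char from str(num).zfill(n)
  answer.map (fun num =>
    String.mk ((pyZfill n (pyStrNat num)).map (fun c => if c = '0' then ' ' else '#')))

-- ===== PORT B =====
-- format(v, 'b') digits for |v| (most significant first)
def binFmtGo (m : Nat) : List Char :=
  if h : m = 0 then [] else binFmtGo (m / 2) ++ [Char.ofNat (48 + m % 2)]
decreasing_by exact Nat.div_lt_self (Nat.pos_of_ne_zero h) (by norm_num)

-- format(v, 'b')
def binFmt (v : Int) : List Char :=
  if v < 0 then '-' :: binFmtGo (-v).toNat
  else if v = 0 then ['0'] else binFmtGo v.toNat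

-- s.zfill(n) including Python's sign rule (zeros go after a leading '-')
def zfillB (n : Int) (s : List Char) : List Char :=
  if (s.length : Int) < n then
    if s.head? = some '-' then '-' :: (List.replicate (n - (s.length : Int)).toNat '0' ++ s.tail)
    else List.replicate (n - (s.length : Int)).toNat '0' ++ s
  else s

-- str.maketrans('01', ' #') applied per character
def translateB (c : Char) : Char := if c = '0' then ' ' else if c = '1' then '#' else c

def solution_alt (n : Int) (arr1 : List Int) (arr2 : List Int) : List String :=
  (arr1.zip arr2).map (fun p =>
    String.mk ((zfillB n (binFmt (Int.lor p.1 p.2))).map translateB))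

-- ===== PRECONDITION & SPEC =====
-- Pre_ excludes exactly the inputs where some paired element is negative: there A raises ValueError
-- (int('b…') from bin(negative)), returning nothing.
def Pre_solution (n : Int) (arr1 : List Int) (arr2 : List Int) : Prop :=
  ∀ p ∈ arr1.zip arr2, 0 ≤ p.1 ∧ 0 ≤ p.2
instance (n : Int) (arr1 : List Int) (arr2 : List Int) : Decidable (Pre_solution n arr1 arr2) := by
  unfold Pre_solution; infer_instance

def pvWitness_solution : Int × List Int × List Int := (5, [9, 20, 28, 18, 11], [30, 1, 21, 17, 28])

def Spec_solution (n : Int) (arr1 : List Int) (arr2 : List Int) (out : List String) : Prop := out = solution_alt n arr1 arr2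
instance (n : Int) (arr1 : List Int) (arr2 : List Int) (out : List String) : Decidable (Spec_solution n arr1 arr2 out) := by unfold Spec_solution; infer_instance

-- ===== CLAIM (what is proved, stated in full; the proofs are below) =====
def Claim_equal_solution : Prop := ∀ (n : Int) (arr1 : List Int) (arr2 : List Int), Dom_solution n arr1 arr2 → Pre_solution n arr1 arr2 → Spec_solution n arr1 arr2 (solution n arr1 arr2)

-- ===== LEMMAS AND PROOFS =====

-- least-significant-first digit machinery used only by the proofs
def bitsL (m : Nat) : List Nat :=
  if h : m = 0 then [] else m % 2 :: bitsL (m / 2)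
decreasing_by exact Nat.div_lt_self (Nat.pos_of_ne_zero h) (by norm_num)

def decLs (m : Nat) : List Nat :=
  if h : m = 0 then [] else m % 10 :: decLs (m / 10)
decreasing_by exact Nat.div_lt_self (Nat.pos_of_ne_zero h) (by norm_num)

def valL (l : List Nat) : Nat := l.foldr (fun d acc => d + 10 * acc) 0

def dch (d : Nat) : Char := Char.ofNat (48 + d)

def zipAdd : List Nat → List Nat → List Nat
  | [], ys => ys
  | xs, [] => xs
  | x :: xs, y :: ys => (x + y) :: zipAdd xs ys

def zipOr : List Nat → List Nat → List Nat
  | [], ys => ys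
  | xs, [] => xs
  | x :: xs, y :: ys => (x ||| y) :: zipOr xs ys

def dlist (m : Nat) : List Nat := if m = 0 then [0] else bitsL m

-- digit-character helpers
theorem dch_toNat {d : Nat} (h : d ≤ 9) : (dch d).toNat = 48 + d := by
  interval_cases d <;> decide

theorem dch_ne_minus {d : Nat} (h : d ≤ 9) : dch d ≠ '-' := by
  intro he
  have : (dch d).toNat = 45 := by rw [he]; rfl
  rw [dch_toNat h] at this
  omega

-- lor on {0,1} digits and on naturals
theorem or_mod_two (x y : Nat) : (x ||| y) % 2 = x % 2 ||| y % 2 := by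
  have h1 : (x ||| y) % 2 = 1 ↔ x % 2 = 1 ∨ y % 2 = 1 := Nat.or_mod_two_eq_one
  rcases Nat.mod_two_eq_zero_or_one x with hx | hx <;>
    rcases Nat.mod_two_eq_zero_or_one y with hy | hy <;>
    rw [hx, hy] <;>
    simp only [show (0:Nat) ||| 0 = 0 from rfl, show (0:Nat) ||| 1 = 1 from rfl,
      show (1:Nat) ||| 0 = 1 from rfl, show (1:Nat) ||| 1 = 1 from rfl] <;>
    rw [hx, hy] at h1 <;> omega

theorem lor_eq_zero_iff (x y : Nat) : x ||| y = 0 ↔ x = 0 ∧ y = 0 := by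
  constructor
  · intro h
    constructor
    · by_contra hx
      have h1 : x ≤ x ||| y := Nat.left_le_or
      have := Nat.pos_of_ne_zero hx
      omega
    · by_contra hy
      have h1 : y ≤ x ||| y := Nat.right_le_or
      have := Nat.pos_of_ne_zero hy
      omega
  · rintro ⟨rfl, rfl⟩; rfl

-- bitsL basics
theorem bitsL_zero : bitsL 0 = [] := by unfold bitsL; simp

theorem bitsL_succ {m : Nat} (h : m ≠ 0) : bitsL m = m % 2 :: bitsL (m / 2) := by
  conv_lhs => unfold bitsL
  simp [h]

theorem bitsL_digits (m : Nat) : ∀ d ∈ bitsL m, d ≤ 1 := by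
  induction m using Nat.strong_induction_on with
  | _ m ih =>
    by_cases h : m = 0
    · subst h; simp [bitsL_zero]
    · rw [bitsL_succ h]
      intro d hd
      rcases List.mem_cons.1 hd with rfl | hd
      · omega
      · exact ih (m / 2) (Nat.div_lt_self (Nat.pos_of_ne_zero h) (by norm_num)) d hd

theorem bitsL_ne_nil {m : Nat} (h : m ≠ 0) : bitsL m ≠ [] := by
  rw [bitsL_succ h]; simp

theorem getLast?_tail {x : Nat} {t : List Nat} (h : (x :: t).getLast? ≠ some 0) :
    t.getLast? ≠ some 0 := by
  cases t with
  | nil => simp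
  | cons y ys => rwa [List.getLast?_cons_cons] at h

theorem bitsL_lastNZ (m : Nat) (h : m ≠ 0) : (bitsL m).getLast? ≠ some 0 := by
  induction m using Nat.strong_induction_on with
  | _ m ih =>
    rw [bitsL_succ h]
    by_cases h2 : m / 2 = 0
    · have hm : m = 1 := by omega
      subst hm
      simp [bitsL_zero]
    · have hne := bitsL_ne_nil h2
      cases hb : bitsL (m / 2) with
      | nil => exact absurd hb hne
      | cons y ys =>
        rw [List.getLast?_cons_cons]
        rw [← hb]
        exact ih (m / 2) (Nat.div_lt_self (Nat.pos_of_ne_zero h) (by norm_num)) h2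

-- decLs basics
theorem decLs_zero : decLs 0 = [] := by unfold decLs; simp

theorem decLs_succ {m : Nat} (h : m ≠ 0) : decLs m = m % 10 :: decLs (m / 10) := by
  conv_lhs => unfold decLs
  simp [h]

-- valL basics
theorem valL_nil : valL [] = 0 := rfl
theorem valL_cons (d : Nat) (l : List Nat) : valL (d :: l) = d + 10 * valL l := rfl

theorem valL_pos : ∀ (l : List Nat), l ≠ [] → l.getLast? ≠ some 0 → 0 < valL l := by
  intro l
  induction l with
  | nil => intro h; exact absurd rfl h
  | cons d t ih =>
    intro _ hlast
    cases t with
    | nil =>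
      simp at hlast
      rw [valL_cons, valL_nil]
      omega
    | cons y ys =>
      have := ih (by simp) (getLast?_tail hlast)
      rw [valL_cons]
      omega

theorem decLs_valL : ∀ (l : List Nat), (∀ d ∈ l, d ≤ 9) → l.getLast? ≠ some 0 →
    decLs (valL l) = l := by
  intro l
  induction l with
  | nil => intro _ _; simp [valL_nil, decLs_zero]
  | cons d t ih =>
    intro hd hlast
    have hd9 : d ≤ 9 := hd d (by simp)
    rw [valL_cons]
    have hne : d + 10 * valL t ≠ 0 := by
      intro h0
      have hdz : d = 0 := by omega
      have hvz : valL t = 0 := by omega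
      cases t with
      | nil => simp [hdz] at hlast
      | cons y ys =>
        have := valL_pos (y :: ys) (by simp) (getLast?_tail hlast)
        omega
    rw [decLs_succ hne]
    have h1 : (d + 10 * valL t) % 10 = d := by omega
    have h2 : (d + 10 * valL t) / 10 = valL t := by omega
    rw [h1, h2, ih (fun x hx => hd x (by simp [hx])) (getLast?_tail hlast)]

-- zipAdd / zipOr basics
theorem zipAdd_nil_left (ys : List Nat) : zipAdd [] ys = ys := by cases ys <;> rfl
theorem zipAdd_nil_right (xs : List Nat) : zipAdd xs [] = xs := by cases xs <;> rfl
theorem zipOr_nil_left (ys : List Nat) : zipOr [] ys = ys := by cases ys <;> rfl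
theorem zipOr_nil_right (xs : List Nat) : zipOr xs [] = xs := by cases xs <;> rfl

theorem length_zipAdd : ∀ (xs ys : List Nat), (zipAdd xs ys).length = max xs.length ys.length := by
  intro xs
  induction xs with
  | nil => intro ys; rw [zipAdd_nil_left]; simp
  | cons x xs ih =>
    intro ys
    cases ys with
    | nil => rw [zipAdd_nil_right]; simp
    | cons y ys => simp [zipAdd, ih]

theorem length_zipOr : ∀ (xs ys : List Nat), (zipOr xs ys).length = max xs.length ys.length := by
  intro xs
  induction xs with
  | nil => intro ys; rw [zipOr_nil_left]; simp
  | cons x xs ih =>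
    intro ys
    cases ys with
    | nil => rw [zipOr_nil_right]; simp
    | cons y ys => simp [zipOr, ih]

-- THE central decimal-addition lemma: adding two 0/1-digit numbers written in base 10 is carry-free
theorem decLs_add : ∀ (xs ys : List Nat),
    (∀ d ∈ xs, d ≤ 1) → (∀ d ∈ ys, d ≤ 1) →
    xs.getLast? ≠ some 0 → ys.getLast? ≠ some 0 →
    decLs (valL xs + valL ys) = zipAdd xs ys := by
  intro xs
  induction xs with
  | nil =>
    intro ys _ hy _ hylast
    rw [valL_nil, zipAdd_nil_left, Nat.zero_add]
    exact decLs_valL ys (fun d hd => by have := hy d hd; omega) hylast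
  | cons x xs ih =>
    intro ys hx hy hxlast hylast
    cases ys with
    | nil =>
      rw [valL_nil, zipAdd_nil_right, Nat.add_zero]
      exact decLs_valL (x :: xs) (fun d hd => by have := hx d hd; omega) hxlast
    | cons y ys =>
      have hx1 : x ≤ 1 := hx x (by simp)
      have hy1 : y ≤ 1 := hy y (by simp)
      rw [valL_cons, valL_cons]
      have heq : x + 10 * valL xs + (y + 10 * valL ys) = (x + y) + 10 * (valL xs + valL ys) := by ring
      rw [heq]
      have hne : (x + y) + 10 * (valL xs + valL ys) ≠ 0 := by
        intro h0
        have hxz : x = 0 := by omega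
        have hsz : valL xs = 0 ∧ valL ys = 0 := by omega
        cases xs with
        | nil => simp [hxz] at hxlast
        | cons a as =>
          have := valL_pos (a :: as) (by simp) (getLast?_tail hxlast)
          omega
      rw [decLs_succ hne]
      have h1 : ((x + y) + 10 * (valL xs + valL ys)) % 10 = x + y := by omega
      have h2 : ((x + y) + 10 * (valL xs + valL ys)) / 10 = valL xs + valL ys := by omega
      rw [h1, h2]
      rw [ih ys (fun d hd => hx d (by simp [hd])) (fun d hd => hy d (by simp [hd]))
        (getLast?_tail hxlast) (getLast?_tail hylast)]
      rfl

-- bitwise or = pointwise or of binary digit lists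
theorem bitsL_lor (x : Nat) : ∀ (y : Nat), bitsL (x ||| y) = zipOr (bitsL x) (bitsL y) := by
  induction x using Nat.strong_induction_on with
  | _ x ih =>
    intro y
    by_cases hx : x = 0
    · subst hx; simp [bitsL_zero, zipOr_nil_left]
    by_cases hy : y = 0
    · subst hy; simp [bitsL_zero, zipOr_nil_right]
    have hxy : x ||| y ≠ 0 := by
      intro h; exact hx ((lor_eq_zero_iff x y).1 h).1
    rw [bitsL_succ hxy, bitsL_succ hx, bitsL_succ hy]
    show _ = (x % 2 ||| y % 2) :: zipOr (bitsL (x / 2)) (bitsL (y / 2))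
    rw [or_mod_two, Nat.or_div_two,
      ih (x / 2) (Nat.div_lt_self (Nat.pos_of_ne_zero hx) (by norm_num)) (y / 2)]

-- char-list shapes of the ports' helpers
theorem pyBinGo_eq (m : Nat) : pyBinGo m = ((bitsL m).map dch).reverse := by
  induction m using Nat.strong_induction_on with
  | _ m ih =>
    by_cases h : m = 0
    · subst h; rw [pyBinGo, bitsL_zero]; simp
    · rw [pyBinGo, bitsL_succ h]
      simp [h, ih (m / 2) (Nat.div_lt_self (Nat.pos_of_ne_zero h) (by norm_num)), dch]

theorem binFmtGo_eq (m : Nat) : binFmtGo m = ((bitsL m).map dch).reverse := by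
  induction m using Nat.strong_induction_on with
  | _ m ih =>
    by_cases h : m = 0
    · subst h; rw [binFmtGo, bitsL_zero]; simp
    · rw [binFmtGo, bitsL_succ h]
      simp [h, ih (m / 2) (Nat.div_lt_self (Nat.pos_of_ne_zero h) (by norm_num)), dch]

theorem pyDecGo_eq (m : Nat) : pyDecGo m = ((decLs m).map dch).reverse := by
  induction m using Nat.strong_induction_on with
  | _ m ih =>
    by_cases h : m = 0
    · subst h; rw [pyDecGo, decLs_zero]; simp
    · rw [pyDecGo, decLs_succ h]
      simp [h, ih (m / 10) (Nat.div_lt_self (Nat.pos_of_ne_zero h) (by norm_num)), dch]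

theorem pyBin_eq (m : Nat) : pyBin m = ((dlist m).map dch).reverse := by
  by_cases h : m = 0
  · subst h; rfl
  · rw [pyBin, dlist, if_neg h, if_neg h, pyBinGo_eq]

theorem pyIntDigits_rev (l : List Nat) (h : ∀ d ∈ l, d ≤ 9) :
    pyIntDigits ((l.map dch).reverse) = valL l := by
  unfold pyIntDigits valL
  rw [List.foldl_reverse, List.foldr_map]
  apply List.foldr_ext
  intro d hd acc
  rw [dch_toNat (h d hd)]
  omega

-- dlist basics
theorem dlist_digits (m : Nat) : ∀ d ∈ dlist m, d ≤ 1 := by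
  unfold dlist
  split
  · simp
  · exact bitsL_digits m

-- str(num) of A's per-row sum, as digit lists
theorem rowSum_eq (x y : Nat) :
    pyStrNat (pyIntDigits (pyBin x) + pyIntDigits (pyBin y)) =
      ((zipAdd (dlist x) (dlist y)).map dch).reverse := by
  rw [pyBin_eq, pyBin_eq,
    pyIntDigits_rev _ (fun d hd => by have := dlist_digits x d hd; omega),
    pyIntDigits_rev _ (fun d hd => by have := dlist_digits y d hd; omega)]
  by_cases hx : x = 0 <;> by_cases hy : y = 0
  · subst hx; subst hy; decide
  · have e1 : dlist x = [0] := by rw [dlist, if_pos hx]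
    have e2 : dlist y = bitsL y := by rw [dlist, if_neg hy]
    rw [e1, e2, show valL [0] = 0 from rfl, Nat.zero_add]
    have hpos := valL_pos (bitsL y) (bitsL_ne_nil hy) (bitsL_lastNZ y hy)
    rw [pyStrNat, if_neg (by omega), pyDecGo_eq,
      decLs_valL (bitsL y) (fun d hd => by have := bitsL_digits y d hd; omega)
        (bitsL_lastNZ y hy)]
    cases hb : bitsL y with
    | nil => exact absurd hb (bitsL_ne_nil hy)
    | cons h t => show _ = (((0 + h) :: zipAdd [] t).map dch).reverse
                  rw [zipAdd_nil_left, Nat.zero_add]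
  · have e1 : dlist x = bitsL x := by rw [dlist, if_neg hx]
    have e2 : dlist y = [0] := by rw [dlist, if_pos hy]
    rw [e1, e2, show valL [0] = 0 from rfl, Nat.add_zero]
    have hpos := valL_pos (bitsL x) (bitsL_ne_nil hx) (bitsL_lastNZ x hx)
    rw [pyStrNat, if_neg (by omega), pyDecGo_eq,
      decLs_valL (bitsL x) (fun d hd => by have := bitsL_digits x d hd; omega)
        (bitsL_lastNZ x hx)]
    cases hb : bitsL x with
    | nil => exact absurd hb (bitsL_ne_nil hx)
    | cons h t => show _ = (((h + 0) :: zipAdd t []).map dch).reverse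
                  rw [zipAdd_nil_right, Nat.add_zero]
  · have e1 : dlist x = bitsL x := by rw [dlist, if_neg hx]
    have e2 : dlist y = bitsL y := by rw [dlist, if_neg hy]
    rw [e1, e2]
    have hposx := valL_pos (bitsL x) (bitsL_ne_nil hx) (bitsL_lastNZ x hx)
    rw [pyStrNat, if_neg (by omega), pyDecGo_eq,
      decLs_add (bitsL x) (bitsL y) (bitsL_digits x) (bitsL_digits y)
        (bitsL_lastNZ x hx) (bitsL_lastNZ y hy)]

-- B's or-digit list, with the zero special case
theorem zipOr_dlist (x y : Nat) :
    zipOr (dlist x) (dlist y) = if x = 0 ∧ y = 0 then [0] else bitsL (x ||| y) := by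
  by_cases hx : x = 0 <;> by_cases hy : y = 0
  · subst hx; subst hy; decide
  · have e1 : dlist x = [0] := by rw [dlist, if_pos hx]
    have e2 : dlist y = bitsL y := by rw [dlist, if_neg hy]
    subst hx
    rw [if_neg (by simp [hy]), e1, e2, Nat.zero_or]
    cases hb : bitsL y with
    | nil => exact absurd hb (bitsL_ne_nil hy)
    | cons h t => show (0 ||| h) :: zipOr [] t = h :: t
                  rw [zipOr_nil_left, Nat.zero_or]
  · have e1 : dlist x = bitsL x := by rw [dlist, if_neg hx]
    have e2 : dlist y = [0] := by rw [dlist, if_pos hy]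
    subst hy
    rw [if_neg (by simp [hx]), e1, e2, Nat.or_zero]
    cases hb : bitsL x with
    | nil => exact absurd hb (bitsL_ne_nil hx)
    | cons h t => show (h ||| 0) :: zipOr t [] = h :: t
                  rw [zipOr_nil_right, Nat.or_zero]
  · have e1 : dlist x = bitsL x := by rw [dlist, if_neg hx]
    have e2 : dlist y = bitsL y := by rw [dlist, if_neg hy]
    rw [if_neg (by simp [hx]), e1, e2, bitsL_lor]

-- B's formatted row as digit lists
theorem rowOr_eq (a b : Int) (ha : 0 ≤ a) (hb : 0 ≤ b) :
    binFmt (Int.lor a b) =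
      ((zipOr (dlist a.toNat) (dlist b.toNat)).map dch).reverse := by
  have hae : (a.toNat : Int) = a := Int.toNat_of_nonneg ha
  have hbe : (b.toNat : Int) = b := Int.toNat_of_nonneg hb
  have hlor : Int.lor a b = Int.ofNat (a.toNat ||| b.toNat) := by
    conv_lhs => rw [← hae, ← hbe]
    rfl
  rw [hlor, binFmt,
    if_neg (show ¬ Int.ofNat (a.toNat ||| b.toNat) < 0 from not_lt.2 (Int.zero_le_ofNat _)),
    zipOr_dlist]
  by_cases h0 : a.toNat = 0 ∧ b.toNat = 0
  · rw [if_pos h0]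
    have hz : a.toNat ||| b.toNat = 0 := (lor_eq_zero_iff _ _).2 h0
    rw [hz]
    rfl
  · have hne : a.toNat ||| b.toNat ≠ 0 := fun hc => h0 ((lor_eq_zero_iff _ _).1 hc)
    rw [if_neg h0, if_neg (by simpa using hne),
      show Int.toNat (Int.ofNat (a.toNat ||| b.toNat)) = a.toNat ||| b.toNat from rfl,
      binFmtGo_eq]

-- pointwise: A's char map over the digit sums = B's translate over the or-digits
theorem pointwise_eq : ∀ (xs ys : List Nat), (∀ d ∈ xs, d ≤ 1) → (∀ d ∈ ys, d ≤ 1) →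
    (zipAdd xs ys).map (fun d => if dch d = '0' then ' ' else '#') =
      (zipOr xs ys).map (fun d => translateB (dch d)) := by
  have single : ∀ d : Nat, d ≤ 1 →
      (if dch d = '0' then ' ' else '#') = translateB (dch d) := by
    intro d hd
    have : d = 0 ∨ d = 1 := by omega
    rcases this with rfl | rfl <;> decide
  intro xs
  induction xs with
  | nil =>
    intro ys _ hy
    rw [zipAdd_nil_left, zipOr_nil_left]
    exact List.map_congr_left (fun d hd => single d (hy d hd))
  | cons x xs ih =>
    intro ys hx hy
    cases ys with
    | nil =>
      rw [zipAdd_nil_right, zipOr_nil_right]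
      exact List.map_congr_left (fun d hd => single d (hx d hd))
    | cons y ys =>
      have hx1 : x ≤ 1 := hx x (by simp)
      have hy1 : y ≤ 1 := hy y (by simp)
      show (if dch (x + y) = '0' then ' ' else '#') :: _ =
        translateB (dch (x ||| y)) :: _
      congr 1
      · have : (x = 0 ∨ x = 1) ∧ (y = 0 ∨ y = 1) := ⟨by omega, by omega⟩
        rcases this with ⟨rfl | rfl, rfl | rfl⟩ <;> decide
      · exact ih ys (fun d hd => hx d (by simp [hd])) (fun d hd => hy d (by simp [hd]))

-- the two zfills agree on sign-free strings
theorem zfillB_eq_pyZfill (n : Int) (s : List Char) (h : ∀ c ∈ s, c ≠ '-') :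
    zfillB n s = pyZfill n s := by
  rw [zfillB, pyZfill]
  split
  · rw [if_neg]
    intro hc
    cases s with
    | nil => simp at hc
    | cons c rest =>
      simp at hc
      exact h c (by simp) hc
  · rfl

-- every digit of a zipOr of 0/1-lists is ≤ 1
theorem zipOr_digits : ∀ (xs ys : List Nat), (∀ d ∈ xs, d ≤ 1) → (∀ d ∈ ys, d ≤ 1) →
    ∀ d ∈ zipOr xs ys, d ≤ 1 := by
  intro xs
  induction xs with
  | nil => intro ys _ hy d hd; rw [zipOr_nil_left] at hd; exact hy d hd
  | cons x xs ih =>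
    intro ys hx hy d hd
    cases ys with
    | nil => rw [zipOr_nil_right] at hd; exact hx d hd
    | cons y ys =>
      rcases List.mem_cons.1 hd with rfl | hd2
      · have h1 := hx x List.mem_cons_self
        have h2 := hy y List.mem_cons_self
        interval_cases x <;> interval_cases y <;> decide
      · exact ih ys (fun e he => hx e (by simp [he])) (fun e he => hy e (by simp [he])) d hd2

-- per-row equality
theorem row_eq (n : Int) (a b : Int) (ha : 0 ≤ a) (hb : 0 ≤ b) :
    String.mk ((pyZfill n (pyStrNat (pyIntDigits (pyBin a.toNat) + pyIntDigits (pyBin b.toNat)))).map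
      (fun c => if c = '0' then ' ' else '#')) =
    String.mk ((zfillB n (binFmt (Int.lor a b))).map translateB) := by
  rw [rowSum_eq, rowOr_eq a b ha hb]
  set px := dlist a.toNat with hpxdef
  set py := dlist b.toNat with hpydef
  have hpx : ∀ d ∈ px, d ≤ 1 := dlist_digits a.toNat
  have hpy : ∀ d ∈ py, d ≤ 1 := dlist_digits b.toNat
  have hor : ∀ d ∈ zipOr px py, d ≤ 1 := zipOr_digits px py hpx hpy
  -- the or-string contains only digit characters, never '-'
  rw [zfillB_eq_pyZfill _ _ (by
    intro c hc
    simp only [List.mem_reverse, List.mem_map] at hc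
    obtain ⟨d, hd, rfl⟩ := hc
    exact dch_ne_minus (by have := hor d hd; omega))]
  -- equal lengths, then pointwise agreement
  have hlen : ((zipAdd px py).map dch).reverse.length = ((zipOr px py).map dch).reverse.length := by
    simp [length_zipAdd, length_zipOr]
  apply congrArg String.mk
  rw [pyZfill, pyZfill, hlen]
  have hbody : ((zipAdd px py).map dch).reverse.map (fun c => if c = '0' then ' ' else '#') =
      ((zipOr px py).map dch).reverse.map translateB := by
    rw [List.map_reverse, List.map_reverse, List.map_map, List.map_map]
    have h := pointwise_eq px py hpx hpy
    simp only [Function.comp_def]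
    exact congrArg List.reverse h
  split
  · rw [List.map_append, List.map_append, List.map_replicate, List.map_replicate, hbody]
    rfl
  · exact hbody

-- ===== VERDICT (by name: the statement is the Claim_ definition above) =====
theorem solution_spec : Claim_equal_solution := by
  intro n arr1 arr2 _ hpre
  unfold Spec_solution solution solution_alt
  rw [List.map_map]
  apply List.map_congr_left
  intro p hp
  exact row_eq n p.1 p.2 (hpre p hp).1 (hpre p hp).2
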